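-- pv_equiv track=rewrite | github.com/jordan-astley/advent-of-code-2021 | AOC5_hydrothermal_vents/test.py | make_line_between_points
-- ===== SOURCE A (Python) =====
-- def parallelx(coordinatePair)->bool:
--     if coordinatePair[0][1] == coordinatePair[1][1]:
--         return True # line has 2 equal y values, so is parallel with x axis
--     elif coordinatePair[0][0] == coordinatePair[1][0]:
--         return False # line has 2 equal x values, so it parallel with y axis
--     else:
--         return ValueError
--
-- def set_xvalues_from_pair_of_coordinates(coordinatePair):
--     if (coordinatePair[0][0]) > (coordinatePair[1][0]): # case where x1 is greater than x2
--         x_values = list(range(coordinatePair[1][0]+1, coordinatePair[0][0], 1))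
--         x_values.reverse()
--     else:
--         x_values = list(range(coordinatePair[0][0]+1, coordinatePair[1][0], 1))
--     # list of points between on the axis, excluding the original two values
--     y = coordinatePair[0][1] # y coordinates are equal so assign y to one of them
--
--     return x_values, y
--
-- def set_yvalues_from_pair_of_coordinates(coordinatePair):
--     if (coordinatePair[0][1]) > (coordinatePair[1][1]): # case where x1 is greater than x2
--         y_values = list(range(coordinatePair[1][1]+1, coordinatePair[0][1], 1))
--         y_values.reverse()
--     else:
--         y_values = list(range(coordinatePair[0][1]+1, coordinatePair[1][1], 1))
--     # list of points between on the axis, excluding the original two values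
--     x = coordinatePair[0][0] # x coordinates are equal so assign x to one of them
--     return y_values, x
--
-- def make_line_between_points(coordinatePair):
--     n = 1
--     if parallelx(coordinatePair) == True:
--         x_values,y = set_xvalues_from_pair_of_coordinates(coordinatePair)
--         for item in x_values:
--             coordinatePair.insert(n,[item,y])
--             n += 1
--     elif parallelx(coordinatePair) == False:
--         y_values,x = set_yvalues_from_pair_of_coordinates(coordinatePair)
--         for item in y_values:
--             coordinatePair.insert(n,[x,item])
--             n += 1
--     if parallelx(coordinatePair) == ValueError:
--         pass
--
--     return coordinatePair
-- ===== SOURCE B (Python) =====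
-- # B: one function, sign-and-step closed form instead of A's three helpers with
-- # ranges/reverse; mutates the same list object in place like A (splice at [1:1]).
-- def make_line_between_points(coordinatePair):
--     x1, y1 = coordinatePair[0][0], coordinatePair[0][1]
--     x2, y2 = coordinatePair[1][0], coordinatePair[1][1]
--     if x1 != x2 and y1 != y2:
--         return coordinatePair  # diagonal: untouched
--     sx = (x1 < x2) - (x2 < x1)
--     sy = (y1 < y2) - (y2 < y1)
--     count = max(abs(x2 - x1), abs(y2 - y1))
--     coordinatePair[1:1] = [[x1 + i * sx, y1 + i * sy] for i in range(1, count)]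
--     return coordinatePair
-- ===== Notes on version B (the rewrite author's own statement) =====
-- stated objective: simpler
-- what changed: Replaced A's three helpers (parallelx probe, two direction-cased range/reverse builders, an insert-with-counter loop) by one closed-form pass: unit step signs sx,sy and count=max(|dx|,|dy|), splicing the generated intermediate points at [1:1] in one slice assignment.
import Mathlib
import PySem

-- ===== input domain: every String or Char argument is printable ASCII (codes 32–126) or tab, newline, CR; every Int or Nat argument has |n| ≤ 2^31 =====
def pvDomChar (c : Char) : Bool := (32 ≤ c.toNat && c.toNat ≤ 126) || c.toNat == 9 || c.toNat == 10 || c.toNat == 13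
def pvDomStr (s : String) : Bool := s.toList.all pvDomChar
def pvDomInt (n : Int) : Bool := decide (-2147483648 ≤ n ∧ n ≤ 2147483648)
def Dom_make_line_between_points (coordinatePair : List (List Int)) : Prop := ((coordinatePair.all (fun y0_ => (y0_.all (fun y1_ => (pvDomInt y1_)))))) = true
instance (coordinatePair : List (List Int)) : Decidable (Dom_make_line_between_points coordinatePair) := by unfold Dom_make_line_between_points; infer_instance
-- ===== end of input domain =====

-- B inlines A's three helpers into one closed-form splice (sign steps + max-distance count);
-- both Pythons mutate the argument list in place and return it — the equivalence proved here
-- is about the returned value.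

-- ===== PORT A =====
-- cp[i][j]: pyGetD is exact here because Pre_ guarantees the indices are in range.
-- parallelx returns True/False or the class ValueError; modelled as some true/some false/none.
def parallelx (coordinatePair : List (List Int)) : Option Bool :=
  if PySem.List.pyGetD (PySem.List.pyGetD coordinatePair 0 []) 1 0
      = PySem.List.pyGetD (PySem.List.pyGetD coordinatePair 1 []) 1 0 then some true
  else if PySem.List.pyGetD (PySem.List.pyGetD coordinatePair 0 []) 0 0
      = PySem.List.pyGetD (PySem.List.pyGetD coordinatePair 1 []) 0 0 then some false
  else none

def set_xvalues_from_pair_of_coordinates (coordinatePair : List (List Int)) : List Int × Int :=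
  let x_values :=
    if PySem.List.pyGetD (PySem.List.pyGetD coordinatePair 0 []) 0 0
        > PySem.List.pyGetD (PySem.List.pyGetD coordinatePair 1 []) 0 0 then
      (PySem.List.pyRange (PySem.List.pyGetD (PySem.List.pyGetD coordinatePair 1 []) 0 0 + 1)
        (PySem.List.pyGetD (PySem.List.pyGetD coordinatePair 0 []) 0 0) 1).reverse
    else
      PySem.List.pyRange (PySem.List.pyGetD (PySem.List.pyGetD coordinatePair 0 []) 0 0 + 1)
        (PySem.List.pyGetD (PySem.List.pyGetD coordinatePair 1 []) 0 0) 1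
  (x_values, PySem.List.pyGetD (PySem.List.pyGetD coordinatePair 0 []) 1 0)

def set_yvalues_from_pair_of_coordinates (coordinatePair : List (List Int)) : List Int × Int :=
  let y_values :=
    if PySem.List.pyGetD (PySem.List.pyGetD coordinatePair 0 []) 1 0
        > PySem.List.pyGetD (PySem.List.pyGetD coordinatePair 1 []) 1 0 then
      (PySem.List.pyRange (PySem.List.pyGetD (PySem.List.pyGetD coordinatePair 1 []) 1 0 + 1)
        (PySem.List.pyGetD (PySem.List.pyGetD coordinatePair 0 []) 1 0) 1).reverse
    else
      PySem.List.pyRange (PySem.List.pyGetD (PySem.List.pyGetD coordinatePair 0 []) 1 0 + 1)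
        (PySem.List.pyGetD (PySem.List.pyGetD coordinatePair 1 []) 1 0) 1
  (y_values, PySem.List.pyGetD (PySem.List.pyGetD coordinatePair 0 []) 0 0)

-- the trailing `if parallelx(...) == ValueError: pass` of A is a no-op and is omitted
def make_line_between_points (coordinatePair : List (List Int)) : List (List Int) :=
  let n : Int := 1
  if parallelx coordinatePair = some true then
    let p := set_xvalues_from_pair_of_coordinates coordinatePair
    (p.1.foldl (fun (st : List (List Int) × Int) item =>
        (PySem.List.insert st.1 st.2 [item, p.2], st.2 + 1)) (coordinatePair, n)).1
  else if parallelx coordinatePair = some false then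
    let p := set_yvalues_from_pair_of_coordinates coordinatePair
    (p.1.foldl (fun (st : List (List Int) × Int) item =>
        (PySem.List.insert st.1 st.2 [p.2, item], st.2 + 1)) (coordinatePair, n)).1
  else coordinatePair

-- ===== PORT B =====
def make_line_between_points_alt (coordinatePair : List (List Int)) : List (List Int) :=
  let x1 := PySem.List.pyGetD (PySem.List.pyGetD coordinatePair 0 []) 0 0
  let y1 := PySem.List.pyGetD (PySem.List.pyGetD coordinatePair 0 []) 1 0
  let x2 := PySem.List.pyGetD (PySem.List.pyGetD coordinatePair 1 []) 0 0
  let y2 := PySem.List.pyGetD (PySem.List.pyGetD coordinatePair 1 []) 1 0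
  if x1 ≠ x2 ∧ y1 ≠ y2 then coordinatePair
  else
    let sx : Int := (if x1 < x2 then 1 else 0) - (if x2 < x1 then 1 else 0)
    let sy : Int := (if y1 < y2 then 1 else 0) - (if y2 < y1 then 1 else 0)
    let count : Int := max |x2 - x1| |y2 - y1|
    let mids := (PySem.List.pyRange 1 count 1).map (fun i => [x1 + i * sx, y1 + i * sy])
    -- cp[1:1] = mids: splice after the first element
    coordinatePair.take 1 ++ mids ++ coordinatePair.drop 1

-- ===== PRECONDITION & SPEC =====
-- Pre_: A indexes rows 0 and 1 and their entries 0 and 1; on shorter input it raises IndexError.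
def Pre_make_line_between_points (coordinatePair : List (List Int)) : Prop :=
  2 ≤ coordinatePair.length
    ∧ 2 ≤ (coordinatePair.getD 0 []).length
    ∧ 2 ≤ (coordinatePair.getD 1 []).length
instance (coordinatePair : List (List Int)) : Decidable (Pre_make_line_between_points coordinatePair) := by
  unfold Pre_make_line_between_points; infer_instance

def pvWitness_make_line_between_points : List (List Int) := [[0, 0], [3, 0]]

def Spec_make_line_between_points (coordinatePair : List (List Int)) (out : List (List Int)) : Prop :=
  out = make_line_between_points_alt coordinatePair
instance (coordinatePair : List (List Int)) (out : List (List Int)) : Decidable (Spec_make_line_between_points coordinatePair out) := by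
  unfold Spec_make_line_between_points; infer_instance

-- ===== CLAIM (what is proved, stated in full; the proofs are below) =====
def Claim_equal_make_line_between_points : Prop := ∀ (coordinatePair : List (List Int)), Dom_make_line_between_points coordinatePair → Pre_make_line_between_points coordinatePair → Spec_make_line_between_points coordinatePair (make_line_between_points coordinatePair)

-- ===== LEMMAS AND PROOFS =====

-- A's insertion loop, run from position 1 + pre.length on h :: pre ++ t, splices the mapped items in order.
theorem foldl_insert_splice (g : Int → List Int) (items : List Int) (h : List Int)
    (pre t : List (List Int)) :
    (items.foldl (fun (st : List (List Int) × Int) item =>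
        (PySem.List.insert st.1 st.2 (g item), st.2 + 1))
      (h :: (pre ++ t), (1 : Int) + pre.length)).1 = h :: pre ++ items.map g ++ t := by
  induction items generalizing pre with
  | nil => simp
  | cons a items ih =>
    have hins : PySem.List.insert (h :: (pre ++ t)) ((1 : Int) + pre.length) (g a)
        = h :: ((pre ++ [g a]) ++ t) := by
      have h2 : ((1 : Int) + pre.length) = (((pre.length + 1 : Nat) : Int)) := by push_cast; ring
      rw [h2, PySem.List.insert_natCast _ _ _ (by simp)]
      simp [List.take_succ_cons, List.drop_succ_cons]
    simp only [List.foldl_cons, hins]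
    have h3 : ((1 : Int) + pre.length + 1) = (1 : Int) + ((pre ++ [g a]).length : Int) := by
      simp; ring
    rw [h3, ih (pre ++ [g a])]
    simp

-- (a :: b :: l)[1] with a default, by computation
theorem getD_one {α : Type} (a b : α) (l : List α) (d : α) : (a :: b :: l).getD 1 d = b := rfl

-- Two step-1 ranges of equal length with pointwise-equal mapped values give equal lists.
theorem pyRange_map_eq (a b lo hi : Int) (f g : Int → List Int)
    (hlen : (b - a).toNat = (hi - lo).toNat)
    (hfg : ∀ k : Nat, (k : Int) < b - a → f (a + k) = g (lo + k)) :
    (PySem.List.pyRange a b 1).map f = (PySem.List.pyRange lo hi 1).map g := by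
  rw [PySem.List.pyRange_one, PySem.List.pyRange_one, List.map_map, List.map_map, ← hlen]
  apply List.map_congr_left
  intro k hk
  simp only [List.mem_range] at hk
  simpa using hfg k (by omega)

-- Same, with the left range built downwards (A's reversed range).
theorem pyRange_rev_map_eq (b c lo hi : Int) (f g : Int → List Int)
    (hlen : (c - 1 - b).toNat = (hi - lo).toNat)
    (hfg : ∀ k : Nat, (k : Int) < c - 1 - b → f (c - 1 - k) = g (lo + k)) :
    ((PySem.List.pyRange (b + 1) c 1).reverse).map f
      = (PySem.List.pyRange lo hi 1).map g := by
  have hc : c = (c - 1) + 1 := by ring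
  rw [hc, ← PySem.List.pyRange_neg_one_eq_reverse, PySem.List.pyRange_neg_one,
    PySem.List.pyRange_one, List.map_map, List.map_map, ← hlen]
  apply List.map_congr_left
  intro k hk
  simp only [List.mem_range] at hk
  simpa using hfg k (by omega)

theorem make_line_between_points_spec : Claim_equal_make_line_between_points := by
  intro cp _hdom hpre
  obtain ⟨hl, h0, h1⟩ := hpre
  unfold Spec_make_line_between_points
  match cp, hl, h0, h1 with
  | (x1 :: y1 :: r0) :: (x2 :: y2 :: r1) :: t, _, _, _ =>
    have hsplice := fun g items => foldl_insert_splice g items (x1 :: y1 :: r0) [] ((x2 :: y2 :: r1) :: t)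
    simp only [List.nil_append, List.length_nil, Nat.cast_zero, add_zero] at hsplice
    unfold make_line_between_points make_line_between_points_alt parallelx
      set_xvalues_from_pair_of_coordinates set_yvalues_from_pair_of_coordinates
    simp only [pysem, List.getD_cons_zero, getD_one]
    by_cases hy : y1 = y2
    · subst hy
      by_cases hxx : x1 = x2
      · subst hxx
        simp
      · by_cases hgt : x2 < x1
        · have hnlt : ¬ x1 < x2 := by omega
          simp only [gt_iff_lt, if_pos hgt, if_neg hxx, if_neg hnlt,
            reduceIte, ne_eq, not_true_eq_false, and_false, if_false, hsplice]
          simp only [List.cons_append, List.nil_append,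
            List.drop_succ_cons, List.drop_zero, List.take_succ_cons, List.take_zero]
          congr 2
          exact pyRange_rev_map_eq x2 x1 1 _ _ _
            (by rw [show |x2 - x1| = x1 - x2 from by rw [abs_of_neg (by omega)]; ring]; simp; omega)
            (fun k hk => by simp; ring)
        · have hlt : x1 < x2 := by omega
          simp only [gt_iff_lt, if_neg hgt, if_neg hxx, if_pos hlt,
            reduceIte, ne_eq, not_true_eq_false, and_false, if_false, hsplice]
          simp only [List.cons_append, List.nil_append,
            List.drop_succ_cons, List.drop_zero, List.take_succ_cons, List.take_zero]
          congr 2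
          exact pyRange_map_eq (x1 + 1) x2 1 _ _ _
            (by rw [show |x2 - x1| = x2 - x1 from abs_of_pos (by omega)]; simp; omega)
            (fun k hk => by simp; ring)
    · by_cases hx : x1 = x2
      · subst hx
        by_cases hgt : y2 < y1
        · have hnlt : ¬ y1 < y2 := by omega
          simp only [if_neg hy, gt_iff_lt, if_pos hgt, if_neg hnlt,
            reduceIte, ne_eq, not_true_eq_false, false_and, if_false, hsplice]
          rw [if_neg (by decide : ¬ ((some false : Option Bool) = some true))]
          simp only [List.cons_append, List.nil_append,
            List.drop_succ_cons, List.drop_zero, List.take_succ_cons, List.take_zero]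
          congr 2
          exact pyRange_rev_map_eq y2 y1 1 _ _ _
            (by rw [show |y2 - y1| = y1 - y2 from by rw [abs_of_neg (by omega)]; ring]; simp; omega)
            (fun k hk => by simp; ring)
        · have hlt : y1 < y2 := by omega
          simp only [if_neg hy, gt_iff_lt, if_neg hgt, if_pos hlt,
            reduceIte, ne_eq, not_true_eq_false, false_and, if_false, hsplice]
          rw [if_neg (by decide : ¬ ((some false : Option Bool) = some true))]
          simp only [List.cons_append, List.nil_append,
            List.drop_succ_cons, List.drop_zero, List.take_succ_cons, List.take_zero]
          congr 2
          exact pyRange_map_eq (y1 + 1) y2 1 _ _ _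
            (by rw [show |y2 - y1| = y2 - y1 from abs_of_pos (by omega)]; simp; omega)
            (fun k hk => by simp; ring)
      · simp [hy, hx]
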